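-- pv_equiv track=rewrite | github.com/5h33pd06/HHC_2025 | scripts/otw/solver.py | split_frames_by_reset
-- ===== SOURCE A (Python) =====
-- def split_frames_by_reset(pulses):
--     frames = []
--     current = []
--     for p in pulses:
--         if p.get("marker") == "reset":
--             if current:
--                 frames.append(current)
--                 current = []
--             continue
--         current.append(p)
--     if current:
--         frames.append(current)
--     return frames
-- ===== SOURCE B (Python) =====
-- def split_frames_by_reset(pulses):
--     bounds = [-1] + [i for i, p in enumerate(pulses) if p.get("marker") == "reset"] + [len(pulses)]
--     frames = [pulses[a + 1:b] for a, b in zip(bounds, bounds[1:])]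
--     return [f for f in frames if f]
-- ===== Notes on version B (the rewrite author's own statement) =====
-- stated objective: alternative
-- what changed: Replaced A's one-pass frames/current accumulator state machine with an index-based staged algorithm: first collect the positions of all reset markers, then slice the list between consecutive cut positions and keep the non-empty slices.
import Mathlib
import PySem

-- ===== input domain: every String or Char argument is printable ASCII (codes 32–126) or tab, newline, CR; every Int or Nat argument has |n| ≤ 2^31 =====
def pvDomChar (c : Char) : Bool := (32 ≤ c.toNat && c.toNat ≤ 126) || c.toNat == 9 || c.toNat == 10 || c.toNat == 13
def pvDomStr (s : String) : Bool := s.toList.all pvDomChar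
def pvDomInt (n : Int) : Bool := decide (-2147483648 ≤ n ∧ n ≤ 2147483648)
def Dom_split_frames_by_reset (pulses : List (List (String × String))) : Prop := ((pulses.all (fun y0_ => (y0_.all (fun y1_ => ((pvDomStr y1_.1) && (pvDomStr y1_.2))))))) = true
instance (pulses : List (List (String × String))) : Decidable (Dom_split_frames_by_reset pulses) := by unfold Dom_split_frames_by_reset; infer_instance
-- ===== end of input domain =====

-- B replaces A's frames/current accumulator state machine with an index-based two-stage
-- algorithm: collect the positions of the reset markers, slice the list between consecutive
-- cut positions, and keep the non-empty slices; alternative decomposition, same cost.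

-- ===== PORT A =====
-- p.get("marker") == "reset"
def pvIsReset (p : List (String × String)) : Bool :=
  (PySem.Dict.mk p).get? "marker" == some "reset"

-- the for-loop over (frames, current)
def pvLoopA (frames : List (List (List (String × String)))) (current : List (List (String × String))) :
    List (List (String × String)) → List (List (List (String × String)))
  | [] => if current.isEmpty then frames else frames ++ [current]
  | p :: rest =>
    if pvIsReset p then
      if current.isEmpty then pvLoopA frames [] rest
      else pvLoopA (frames ++ [current]) [] rest
    else pvLoopA frames (current ++ [p]) rest

def split_frames_by_reset (pulses : List (List (String × String))) : List (List (List (String × String))) :=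
  pvLoopA [] [] pulses

-- ===== PORT B =====
-- [i for i, p in enumerate(pulses) if p.get("marker") == "reset"]
def pvCuts (pulses : List (List (String × String))) : List Int :=
  (PySem.List.enumerate pulses 0).filterMap (fun ip => if pvIsReset ip.2 then some ip.1 else none)

-- bounds = [-1] + cuts + [len(pulses)]; frames = slices between consecutive bounds; keep the non-empty ones
def split_frames_by_reset_alt (pulses : List (List (String × String))) : List (List (List (String × String))) :=
  let bounds : List Int := -1 :: (pvCuts pulses ++ [PySem.List.len pulses])
  let frames := (bounds.zip (PySem.List.slice bounds (some 1) none)).map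
    (fun ab => PySem.List.slice pulses (some (ab.1 + 1)) (some ab.2))
  frames.filter (fun f => !f.isEmpty)

-- ===== PRECONDITION & SPEC =====
def Spec_split_frames_by_reset (pulses : List (List (String × String))) (out : List (List (List (String × String)))) : Prop := out = split_frames_by_reset_alt pulses
instance (pulses : List (List (String × String))) (out : List (List (List (String × String)))) : Decidable (Spec_split_frames_by_reset pulses out) := by unfold Spec_split_frames_by_reset; infer_instance

-- ===== CLAIM (what is proved, stated in full; the proofs are below) =====
def Claim_equal_split_frames_by_reset : Prop := ∀ (pulses : List (List (String × String))), Dom_split_frames_by_reset pulses → Spec_split_frames_by_reset pulses (split_frames_by_reset pulses)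

-- ===== LEMMAS AND PROOFS =====

-- reference splitter: segments between reset markers, empty segments kept
def pvSplit : List (List (String × String)) → List (List (List (String × String)))
  | [] => [[]]
  | p :: rest => if pvIsReset p then [] :: pvSplit rest else (pvSplit rest).modifyHead (p :: ·)

theorem pvSplit_ne_nil (ps : List (List (String × String))) : pvSplit ps ≠ [] := by
  cases ps with
  | nil => simp [pvSplit]
  | cons p rest =>
    obtain ⟨h, t, hht⟩ := List.exists_cons_of_ne_nil (pvSplit_ne_nil rest)
    simp only [pvSplit, hht]
    split <;> simp

-- A's loop emits its accumulated frames in front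
theorem loopA_frames (ps : List (List (String × String)))
    (frames : List (List (List (String × String)))) (current : List (List (String × String))) :
    pvLoopA frames current ps = frames ++ pvLoopA [] current ps := by
  induction ps generalizing frames current with
  | nil => simp only [pvLoopA]; split <;> simp
  | cons p rest ih =>
    simp only [pvLoopA]
    split
    · split
      · exact ih frames []
      · rw [ih (frames ++ [current]) [], ih ([] ++ [current]) []]; simp
    · exact ih frames (current ++ [p])

-- A's loop against the reference splitter
theorem loopA_eq_split (ps : List (List (String × String))) (current : List (List (String × String))) :
    pvLoopA [] current ps = ((pvSplit ps).modifyHead (current ++ ·)).filter (fun f => !f.isEmpty) := by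
  induction ps generalizing current with
  | nil =>
    simp only [pvLoopA, pvSplit, List.modifyHead, List.filter, List.append_nil]
    cases current <;> simp
  | cons p rest ih =>
    by_cases hp : pvIsReset p = true
    · simp only [pvLoopA, hp, if_true, pvSplit, List.modifyHead_cons]
      by_cases hc : current.isEmpty
      · rw [if_pos hc, ih []]
        have hcur : current = [] := by simpa [List.isEmpty_iff] using hc
        subst hcur
        obtain ⟨h, t, hht⟩ := List.exists_cons_of_ne_nil (pvSplit_ne_nil rest)
        simp [hht, List.filter]
      · rw [if_neg hc]
        simp only [List.nil_append, List.append_nil]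
        rw [loopA_frames rest [current] [], ih []]
        obtain ⟨h, t, hht⟩ := List.exists_cons_of_ne_nil (pvSplit_ne_nil rest)
        have hcur : (!current.isEmpty) = true := by simpa using hc
        simp [hht, List.filter, hcur]
    · have hp' : pvIsReset p = false := by simpa using hp
      simp only [pvLoopA, hp', Bool.false_eq_true, if_false, pvSplit]
      rw [ih (current ++ [p])]
      obtain ⟨h, t, hht⟩ := List.exists_cons_of_ne_nil (pvSplit_ne_nil rest)
      simp [hht, List.modifyHead_cons]

-- the slice between two consecutive bounds, cons step (shift both bounds by one)
theorem slice_shift (x : List (String × String)) (l : List (List (String × String)))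
    (a b : Int) (ha : -1 ≤ a) (hb : 0 ≤ b) :
    PySem.List.slice (x :: l) (some (a + 1 + 1)) (some (b + 1)) =
      PySem.List.slice l (some (a + 1)) (some b) := by
  rw [PySem.List.slice_toNat _ (by omega) (by omega), PySem.List.slice_toNat _ (by omega) hb]
  have h1 : (a + 1 + 1).toNat = (a + 1).toNat + 1 := by omega
  have h3 : (b + 1).toNat - (a + 1 + 1).toNat = b.toNat - (a + 1).toNat := by omega
  rw [h3, h1, List.drop_succ_cons]

-- the zip-map of B over a bounds list
def pvZ (l : List (List (String × String))) (bs : List Int) : List (List (List (String × String))) :=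
  (bs.zip bs.tail).map (fun ab => PySem.List.slice l (some (ab.1 + 1)) (some ab.2))

theorem pvZ_shift (x : List (String × String)) (l : List (List (String × String)))
    (a : Int) (bs : List Int) (ha : -1 ≤ a) (hbs : ∀ b ∈ bs, 0 ≤ b) :
    pvZ (x :: l) ((a :: bs).map (· + 1)) = pvZ l (a :: bs) := by
  induction bs generalizing a with
  | nil => rfl
  | cons b t ih =>
    have hb : 0 ≤ b := hbs b (by simp)
    simp only [pvZ, List.map_cons, List.tail_cons, List.zip_cons_cons] at *
    rw [slice_shift x l a b ha hb]
    have := ih b (by omega) (fun c hc => hbs c (by simp [hc]))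
    simpa using this

-- every cut index is nonnegative
theorem pvCuts_nonneg (ps : List (List (String × String))) : ∀ c ∈ pvCuts ps, 0 ≤ c := by
  intro c hc
  simp only [pvCuts, List.mem_filterMap] at hc
  obtain ⟨ip, hip, hcond⟩ := hc
  split at hcond
  · cases hcond
    obtain ⟨k, hk, rfl⟩ := (PySem.List.mem_enumerate_iff _ _ _).mp hip
    simp
  · cases hcond

-- the cut list of a cons
theorem pvCuts_cons (p : List (String × String)) (rest : List (List (String × String))) :
    pvCuts (p :: rest) =
      (if pvIsReset p then [(0 : Int)] else []) ++ (pvCuts rest).map (· + 1) := by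
  have shift : ∀ (xs : List (List (String × String))) (s : Int),
      (PySem.List.enumerate xs s).filterMap (fun ip => if pvIsReset ip.2 then some ip.1 else none)
        = ((PySem.List.enumerate xs 0).filterMap
            (fun ip => if pvIsReset ip.2 then some ip.1 else none)).map (· + s) := by
    intro xs
    induction xs with
    | nil => intro s; simp [PySem.List.enumerate_nil]
    | cons x t ih =>
      intro s
      simp only [PySem.List.enumerate_cons, List.filterMap_cons]
      by_cases hx : pvIsReset x = true
      · simp only [hx, if_true, ih (s + 1), ih 1, List.map_cons, List.map_map, zero_add]
        congr 1
        apply List.map_congr_left; intro c _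
        simp only [Function.comp_apply]; omega
      · simp only [hx, Bool.false_eq_true, if_false, ih (s + 1), ih 1, List.map_map, zero_add]
        apply List.map_congr_left; intro c _
        simp only [Function.comp_apply]; omega
  simp only [pvCuts, PySem.List.enumerate_cons]
  rw [List.filterMap_cons]
  by_cases hx : pvIsReset p = true
  · simp [hx, shift rest 1]
  · simp [hx, shift rest 1]

-- B's frame list equals the reference splitter
theorem frames_eq_split (ps : List (List (String × String))) :
    pvZ ps (-1 :: (pvCuts ps ++ [PySem.List.len ps])) = pvSplit ps := by
  induction ps with
  | nil =>
    simp [pvZ, pvCuts, PySem.List.enumerate_nil, PySem.List.len, pvSplit,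
      PySem.List.slice_toNat]
  | cons p rest ih =>
    have hlen : PySem.List.len (p :: rest) = PySem.List.len rest + 1 := by
      simp [PySem.List.len_eq]
    have htail : ∀ b ∈ pvCuts rest ++ [PySem.List.len rest], 0 ≤ b := by
      intro b hb
      rcases List.mem_append.mp hb with h | h
      · exact pvCuts_nonneg rest b h
      · simp only [List.mem_singleton] at h; subst h; simp [PySem.List.len_eq]
    by_cases hp : pvIsReset p = true
    · -- bounds (p :: rest) = -1 :: (bounds rest).map (· + 1)
      have hb : (-1 : Int) :: (pvCuts (p :: rest) ++ [PySem.List.len (p :: rest)])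
          = -1 :: ((-1 :: (pvCuts rest ++ [PySem.List.len rest])).map (· + 1)) := by
        rw [pvCuts_cons, hlen]; simp [hp]
      rw [hb]
      have hZ : pvZ (p :: rest) ((-1 : Int) :: ((-1 :: (pvCuts rest ++ [PySem.List.len rest])).map (· + 1)))
          = PySem.List.slice (p :: rest) (some 0) (some 0) ::
              pvZ (p :: rest) ((-1 :: (pvCuts rest ++ [PySem.List.len rest])).map (· + 1)) := by
        simp only [pvZ, List.map_cons, List.tail_cons, List.zip_cons_cons, List.map]
        norm_num
      rw [hZ, pvZ_shift p rest (-1) _ (by omega) htail, ih]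
      have hnil : PySem.List.slice (p :: rest) (some 0) (some 0) = ([] : List (List (String × String))) := by
        rw [PySem.List.slice_toNat _ (by omega) (by omega)]; simp
      rw [hnil]
      simp [pvSplit, hp]
    · have hp' : pvIsReset p = false := by simpa using hp
      obtain ⟨c, t, hct⟩ : ∃ c t, pvCuts rest ++ [PySem.List.len rest] = c :: t :=
        List.exists_cons_of_ne_nil (by simp)
      have hc0 : 0 ≤ c := htail c (by rw [hct]; simp)
      have hb : (-1 : Int) :: (pvCuts (p :: rest) ++ [PySem.List.len (p :: rest)])
          = -1 :: ((c :: t).map (· + 1)) := by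
        rw [pvCuts_cons, hlen]
        have : ((pvCuts rest ++ [PySem.List.len rest]).map (· + 1)) = (c :: t).map (· + 1) := by
          rw [hct]
        simp only [hp', Bool.false_eq_true, if_false, List.nil_append] at *
        simpa [List.map_append] using this
      rw [hb]
      have hZ : pvZ (p :: rest) ((-1 : Int) :: ((c :: t).map (· + 1)))
          = PySem.List.slice (p :: rest) (some 0) (some (c + 1)) ::
              pvZ (p :: rest) ((c :: t).map (· + 1)) := by
        simp only [pvZ, List.map_cons, List.tail_cons, List.zip_cons_cons, List.map]
        norm_num
      rw [hZ, pvZ_shift p rest c t (by omega) (fun b hb' => htail b (by rw [hct]; simp [hb']))]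
      have hhead : PySem.List.slice (p :: rest) (some 0) (some (c + 1))
          = p :: PySem.List.slice rest (some 0) (some c) := by
        rw [PySem.List.slice_toNat _ (by omega) (by omega), PySem.List.slice_toNat _ (by omega) hc0]
        have h2 : (c + 1).toNat = c.toNat + 1 := by omega
        simp [h2]
      have hsplit : pvSplit rest = PySem.List.slice rest (some 0) (some c) :: pvZ rest (c :: t) := by
        rw [← ih, hct]
        simp only [pvZ, List.tail_cons, List.zip_cons_cons, List.map]
        norm_num
      rw [hhead]
      simp only [pvSplit, hp', Bool.false_eq_true, if_false, hsplit, List.modifyHead_cons]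

-- ===== VERDICT (by name: the statement is the Claim_ definition above) =====
theorem split_frames_by_reset_spec : Claim_equal_split_frames_by_reset := by
  intro pulses _
  show split_frames_by_reset pulses = split_frames_by_reset_alt pulses
  rw [split_frames_by_reset, loopA_eq_split]
  have halt : split_frames_by_reset_alt pulses
      = (pvZ pulses (-1 :: (pvCuts pulses ++ [PySem.List.len pulses]))).filter (fun f => !f.isEmpty) := by
    simp [split_frames_by_reset_alt, pvZ, PySem.List.slice_from_one]
  rw [halt, frames_eq_split]
  cases h : pvSplit pulses with
  | nil => simp
  | cons a l => simp [List.modifyHead_cons]
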